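-- pv_equiv track=rewrite | github.com/MSUSEL/hawaii-pique-cwe200 | backend/src/bert/run_bert_code.py | get_context_str
-- ===== SOURCE A (Python) =====
-- def camel_case_split(s):
--     words = [[s[0]]]
--     for c in s[1:]:
--         if words[-1][-1].islower() and c.isupper():
--             words.append(list(c))
--         else:
--             words[-1].append(c)
--     return [''.join(word) for word in words]
--
-- def text_preprocess(feature_text):
--     # Split camel case
--     words = camel_case_split(feature_text)
--     # Join words back into a string and convert to lowercase
--     preprocessed_text = ' '.join(words).lower()
--     return preprocessed_text
--
-- def get_context_str(file, var_name):
--     context = " "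
--     for sent in file:
--         if len(sent.strip()) <= 2 or sent.strip()[0] == '*' or (sent.strip()[0] == '\\' and sent.strip()[1] == '\\') or (sent.strip()[0] == '\\' and sent.strip()[1] == '*'):
--             continue
--         if '\''+var_name+'\'' in sent or '"'+var_name+'"' in sent:
--             sent = sent.replace(var_name, ' ')
--             context = context + sent + " "
--     return text_preprocess(context)
-- ===== SOURCE B (Python) =====
-- def get_context_str(file, var_name):
--     # One-pass pairwise camel-boundary split instead of A's list-of-word-lists accumulator;
--     # the relevant lines are collected with a comprehension instead of A's skip-loop.
--     sq = "'" + var_name + "'"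
--     dq = '"' + var_name + '"'
--     def keep(sent):
--         t = sent.strip()
--         return len(t) > 2 and t[0] != '*' and not (t[0] == '\\' and (t[1] == '\\' or t[1] == '*'))
--     kept = [sent.replace(var_name, ' ')
--             for sent in file
--             if keep(sent) and (sq in sent or dq in sent)]
--     ctx = " " + "".join(s + " " for s in kept)
--     body = "".join(a + (' ' if a.islower() and b.isupper() else '')
--                    for a, b in zip(ctx, ctx[1:]))
--     return (body + ctx[-1]).lower()
-- ===== Notes on version B (the rewrite author's own statement) =====
-- stated objective: idiomatic
-- what changed: The camel-case split is done by a single pairwise scan (zip of the string with its tail, inserting a space at each lower-to-upper boundary) instead of A's accumulator of word lists joined afterwards, and the line filter becomes a comprehension with a positive keep predicate whose kept lines are joined once instead of A's continue-loop with repeated string concatenation.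
import Mathlib
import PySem

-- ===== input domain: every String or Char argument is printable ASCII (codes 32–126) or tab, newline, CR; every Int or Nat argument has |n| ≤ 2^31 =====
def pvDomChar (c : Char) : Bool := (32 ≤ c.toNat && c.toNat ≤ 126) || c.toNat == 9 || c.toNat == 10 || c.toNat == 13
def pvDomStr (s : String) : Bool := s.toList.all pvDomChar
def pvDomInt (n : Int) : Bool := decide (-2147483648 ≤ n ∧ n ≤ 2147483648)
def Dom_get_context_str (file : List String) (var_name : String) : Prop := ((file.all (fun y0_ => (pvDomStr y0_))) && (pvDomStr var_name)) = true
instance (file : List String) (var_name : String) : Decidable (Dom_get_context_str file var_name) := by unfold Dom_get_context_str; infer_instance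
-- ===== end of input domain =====

-- B replaces A's list-of-word-lists camel-case accumulator by a single pairwise (zip) scan and
-- A's continue-loop by a comprehension with a positive keep predicate; same cost, more idiomatic.


-- ===== PORT A =====
-- camel_case_split's loop: words is a nonempty list of nonempty char lists; words[-1][-1] is
-- (words.getLastD []).getLastD ' ' (the defaults are unreachable: the invariant holds at every call).
def ccsFoldA (words : List (List Char)) : List Char → List (List Char)
  | [] => words
  | c :: cs =>
    if PySem.Chars.islower ((words.getLastD []).getLastD ' ') && PySem.Chars.isupper c then
      ccsFoldA (words ++ [[c]]) cs
    else
      ccsFoldA (words.dropLast ++ [(words.getLastD []) ++ [c]]) cs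

-- camel_case_split(s); Python raises IndexError on s = "", but get_context_str only calls it on
-- the context, which always starts with ' ' — the [] branch is unreachable from get_context_str.
def camelCaseSplitA (s : List Char) : List (List Char) :=
  match s with
  | [] => []
  | c :: rest => ccsFoldA [[c]] rest

def textPreprocessA (t : List Char) : List Char :=
  PySem.Chars.lower (PySem.Chars.join [' '] (camelCaseSplitA t))

def gcsFoldA (v : List Char) (context : List Char) : List String → List Char
  | [] => context
  | sent :: rest =>
    let s := sent.toList
    let t := PySem.Chars.strip s
    if decide (t.length ≤ 2) || (PySem.List.pyGet? t 0 == some '*')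
        || ((PySem.List.pyGet? t 0 == some '\\') && (PySem.List.pyGet? t 1 == some '\\'))
        || ((PySem.List.pyGet? t 0 == some '\\') && (PySem.List.pyGet? t 1 == some '*')) then
      gcsFoldA v context rest
    else if PySem.Chars.isIn ('\'' :: v ++ ['\'']) s || PySem.Chars.isIn ('"' :: v ++ ['"']) s then
      gcsFoldA v (context ++ PySem.Chars.replace s v [' '] ++ [' ']) rest
    else
      gcsFoldA v context rest

def get_context_str (file : List String) (var_name : String) : String :=
  String.ofList (textPreprocessA (gcsFoldA var_name.toList [' '] file))

-- ===== PORT B =====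
def keepB (t : List Char) : Bool :=
  decide (2 < t.length) && !(PySem.List.pyGet? t 0 == some '*')
    && !((PySem.List.pyGet? t 0 == some '\\')
          && ((PySem.List.pyGet? t 1 == some '\\') || (PySem.List.pyGet? t 1 == some '*')))

def keptB (v : List Char) (file : List String) : List (List Char) :=
  file.filterMap (fun sent =>
    let s := sent.toList
    if keepB (PySem.Chars.strip s)
        && (PySem.Chars.isIn ('\'' :: v ++ ['\'']) s || PySem.Chars.isIn ('"' :: v ++ ['"']) s) then
      some (PySem.Chars.replace s v [' '])
    else none)

-- ''.join(a + (' ' if …) for a, b in zip(ctx, ctx[1:]))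
def camelPairsB (ctx : List Char) : List Char :=
  ((ctx.zip (ctx.drop 1)).map (fun p =>
    p.1 :: (if PySem.Chars.islower p.1 && PySem.Chars.isupper p.2 then [' '] else []))).flatten

def get_context_str_alt (file : List String) (var_name : String) : String :=
  let v := var_name.toList
  let ctx := ' ' :: ((keptB v file).map (· ++ [' '])).flatten
  String.ofList (PySem.Chars.lower (camelPairsB ctx ++ [ctx.getLastD ' ']))

-- ===== PRECONDITION & SPEC =====
def Spec_get_context_str (file : List String) (var_name : String) (out : String) : Prop := out = get_context_str_alt file var_name
instance (file : List String) (var_name : String) (out : String) : Decidable (Spec_get_context_str file var_name out) := by unfold Spec_get_context_str; infer_instance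

-- ===== CLAIM (what is proved, stated in full; the proofs are below) =====
def Claim_equal_get_context_str : Prop := ∀ (file : List String) (var_name : String), Dom_get_context_str file var_name → Spec_get_context_str file var_name (get_context_str file var_name)

-- ===== LEMMAS AND PROOFS =====

-- the camel-case transform, written pair-recursively (proof-only reference function)
def camelTail (prev : Char) : List Char → List Char
  | [] => []
  | c :: cs =>
    (if PySem.Chars.islower prev && PySem.Chars.isupper c then [' ', c] else [c]) ++ camelTail c cs

lemma join_cons_of_ne_nil (sep a : List Char) (t : List (List Char)) (ht : t ≠ []) :
    PySem.Chars.join sep (a :: t) = a ++ sep ++ PySem.Chars.join sep t := by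
  cases t with
  | nil => exact absurd rfl ht
  | cons b l => rw [PySem.Chars.join_cons_cons]

lemma join_snoc (sep y : List Char) (ws : List (List Char)) (h : ws ≠ []) :
    PySem.Chars.join sep (ws ++ [y]) = PySem.Chars.join sep ws ++ sep ++ y := by
  induction ws with
  | nil => exact absurd rfl h
  | cons a l ih =>
    cases l with
    | nil => simp [PySem.Chars.join_cons_cons, PySem.Chars.join_singleton]
    | cons b l' =>
      rw [List.cons_append, join_cons_of_ne_nil sep a _ (by simp),
          join_cons_of_ne_nil sep a _ (by simp), ih (by simp)]
      simp

lemma join_snoc_append (sep w z : List Char) (ws : List (List Char)) :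
    PySem.Chars.join sep (ws ++ [w ++ z]) = PySem.Chars.join sep (ws ++ [w]) ++ z := by
  induction ws with
  | nil => simp [PySem.Chars.join_singleton]
  | cons a l ih =>
    rw [List.cons_append, List.cons_append,
        join_cons_of_ne_nil sep a _ (by simp), join_cons_of_ne_nil sep a _ (by simp), ih]
    simp

lemma ccsFoldA_join (rest : List Char) :
    ∀ (ws : List (List Char)) (w : List Char), w ≠ [] →
      PySem.Chars.join [' '] (ccsFoldA (ws ++ [w]) rest)
        = PySem.Chars.join [' '] (ws ++ [w]) ++ camelTail (w.getLastD ' ') rest := by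
  induction rest with
  | nil => intro ws w _; simp [ccsFoldA, camelTail]
  | cons c cs ih =>
    intro ws w hw
    rw [ccsFoldA]
    have hlast : (ws ++ [w]).getLastD [] = w := by simp
    rw [hlast]
    by_cases hb : (PySem.Chars.islower (w.getLastD ' ') && PySem.Chars.isupper c) = true
    · rw [if_pos hb]
      have h2 := ih (ws ++ [w]) [c] (by simp)
      rw [List.append_assoc] at h2 ⊢
      rw [h2, ← List.append_assoc, join_snoc [' '] [c] (ws ++ [w]) (by simp)]
      rw [camelTail, if_pos hb]
      simp [List.getLastD]
    · rw [if_neg hb]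
      have hdrop : (ws ++ [w]).dropLast = ws := by simp
      rw [hdrop]
      have h2 := ih ws (w ++ [c]) (by simp)
      rw [h2, join_snoc_append, camelTail, if_neg hb, List.getLastD_concat]
      simp

lemma camelPairsB_spec (rest : List Char) :
    ∀ c : Char, camelPairsB (c :: rest) ++ [(c :: rest).getLastD ' '] = c :: camelTail c rest := by
  induction rest with
  | nil => intro c; simp [camelPairsB, camelTail]
  | cons b rs ih =>
    intro c
    have h1 : camelPairsB (c :: b :: rs)
        = (c :: (if PySem.Chars.islower c && PySem.Chars.isupper b then [' '] else []))
            ++ camelPairsB (b :: rs) := by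
      simp [camelPairsB]
    have h2 : (c :: b :: rs).getLastD ' ' = (b :: rs).getLastD ' ' := by
      simp [List.getLastD]
    rw [h1, h2, List.append_assoc, ih b, camelTail]
    by_cases hb : (PySem.Chars.islower c && PySem.Chars.isupper b) = true <;> simp [hb]

-- the two transforms agree on any nonempty string
lemma preprocess_eq (c : Char) (rest : List Char) :
    textPreprocessA (c :: rest)
      = PySem.Chars.lower (camelPairsB (c :: rest) ++ [(c :: rest).getLastD ' ']) := by
  rw [camelPairsB_spec, textPreprocessA, camelCaseSplitA]
  have := ccsFoldA_join rest [] [c] (by simp)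
  simp only [List.nil_append] at this
  rw [this, PySem.Chars.join_singleton]
  simp [List.getLastD]

lemma bool5 (x a b c d : Bool) :
    (!x && !a && !(b && (c || d))) = !(x || a || b && c || b && d) := by
  cases x <;> cases a <;> cases b <;> cases c <;> cases d <;> rfl

lemma keepB_eq_not (t : List Char) :
    keepB t = !(decide (t.length ≤ 2) || (PySem.List.pyGet? t 0 == some '*')
        || ((PySem.List.pyGet? t 0 == some '\\') && (PySem.List.pyGet? t 1 == some '\\'))
        || ((PySem.List.pyGet? t 0 == some '\\') && (PySem.List.pyGet? t 1 == some '*'))) := by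
  have hlen : decide (2 < t.length) = !decide (t.length ≤ 2) := by
    rw [← decide_not, decide_eq_decide]
    omega
  rw [keepB, hlen, bool5]

lemma gcsFoldA_eq_kept (v : List Char) (file : List String) :
    ∀ context : List Char,
      gcsFoldA v context file = context ++ ((keptB v file).map (· ++ [' '])).flatten := by
  induction file with
  | nil => intro context; simp [gcsFoldA, keptB]
  | cons sent rest ih =>
    intro context
    rw [gcsFoldA, keptB, List.filterMap_cons]
    simp only
    by_cases hskip : (decide ((PySem.Chars.strip sent.toList).length ≤ 2)
        || (PySem.List.pyGet? (PySem.Chars.strip sent.toList) 0 == some '*')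
        || ((PySem.List.pyGet? (PySem.Chars.strip sent.toList) 0 == some '\\')
              && (PySem.List.pyGet? (PySem.Chars.strip sent.toList) 1 == some '\\'))
        || ((PySem.List.pyGet? (PySem.Chars.strip sent.toList) 0 == some '\\')
              && (PySem.List.pyGet? (PySem.Chars.strip sent.toList) 1 == some '*'))) = true
    · rw [if_pos hskip]
      have hk : keepB (PySem.Chars.strip sent.toList) = false := by
        rw [keepB_eq_not, hskip]; rfl
      rw [hk]
      simpa [keptB] using ih context
    · rw [if_neg hskip]
      have hk : keepB (PySem.Chars.strip sent.toList) = true := by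
        rw [keepB_eq_not, Bool.eq_false_iff.mpr hskip]; rfl
      rw [hk]
      by_cases hq : (PySem.Chars.isIn ('\'' :: v ++ ['\'']) sent.toList
          || PySem.Chars.isIn ('"' :: v ++ ['"']) sent.toList) = true
      · rw [if_pos hq]
        simp only [Bool.true_and, hq, if_pos]
        rw [ih (context ++ PySem.Chars.replace sent.toList v [' '] ++ [' '])]
        simp [keptB, List.append_assoc]
      · rw [if_neg hq]
        simp only [Bool.true_and, hq]
        simpa [keptB] using ih context

-- ===== VERDICT (by name: the statement is the Claim_ definition above) =====
theorem get_context_str_spec : Claim_equal_get_context_str := by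
  intro file var_name _
  unfold Spec_get_context_str get_context_str get_context_str_alt
  rw [gcsFoldA_eq_kept var_name.toList file [' '], List.singleton_append, preprocess_eq]
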